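-- pv_equiv track=rewrite | github.com/brunosangom/PAR_Assignment3 | rules_generation/rules_generator.py | apply_general_rules
-- ===== SOURCE A (Python) =====
-- def is_rule_covered(specific_rule, general_rule):
--     for key, value in general_rule.items():
--         if value != "*" and specific_rule[key] != value:
--             return False
--     return True
--
-- def apply_general_rules(rules, general_rules):
--     remaining_rules = []
--     covered_indices = set()
--
--     for i, rule in enumerate(rules):
--         for gen_rule in general_rules:
--             if is_rule_covered(rule, gen_rule):
--                 covered_indices.add(i)
--                 break
--
--     for i, rule in enumerate(rules):
--         if i not in covered_indices:
--             remaining_rules.append(rule)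
--
--     return remaining_rules + general_rules
-- ===== SOURCE B (Python) =====
-- def is_rule_covered(specific_rule, general_rule):
--     for key, value in general_rule.items():
--         if value != "*" and specific_rule[key] != value:
--             return False
--     return True
--
-- def apply_general_rules(rules, general_rules):
--     # Loop interchange: instead of testing each rule against all general rules,
--     # sweep each general rule once over a shrinking survivor list.
--     survivors = list(rules)
--     for gen_rule in general_rules:
--         survivors = [r for r in survivors if not is_rule_covered(r, gen_rule)]
--     return survivors + general_rules
-- ===== Notes on version B (the rewrite author's own statement) =====
-- stated objective: alternative
-- what changed: The loop nesting is interchanged: instead of A's per-rule inner scan over general_rules (recording covered indices in a set, then a second enumerate pass copying the uncovered rules), B makes the general rules the outer loop, each one sweeping once over a progressively shrinking survivor list; the index set and the second pass disappear.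
import Mathlib
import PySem

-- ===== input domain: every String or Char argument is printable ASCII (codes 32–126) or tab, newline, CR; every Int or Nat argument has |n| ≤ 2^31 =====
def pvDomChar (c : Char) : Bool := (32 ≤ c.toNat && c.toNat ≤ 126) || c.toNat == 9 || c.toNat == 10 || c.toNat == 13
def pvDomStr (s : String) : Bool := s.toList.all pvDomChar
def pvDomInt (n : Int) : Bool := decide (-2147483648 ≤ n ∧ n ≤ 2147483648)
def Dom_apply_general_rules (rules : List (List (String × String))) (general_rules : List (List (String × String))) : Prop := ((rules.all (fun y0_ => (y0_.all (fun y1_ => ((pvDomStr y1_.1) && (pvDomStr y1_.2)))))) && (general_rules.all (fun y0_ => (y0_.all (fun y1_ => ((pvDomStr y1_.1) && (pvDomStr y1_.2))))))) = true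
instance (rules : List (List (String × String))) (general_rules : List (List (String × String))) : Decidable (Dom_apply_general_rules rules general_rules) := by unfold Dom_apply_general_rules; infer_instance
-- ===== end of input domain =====

-- B interchanges the loops: a fold over general_rules, each pass filtering a shrinking
-- survivor list, replacing A's covered_indices set and its second enumerate pass;
-- equal output on Pre_ (same parameters, return value only).

-- ===== PORT A =====
-- shared helper: Python's is_rule_covered, kept verbatim in both A and B.
-- specific_rule[key] is dict indexing (first match in the association list); the ""
-- default is only reached outside Pre_, where Python raises KeyError.
def is_rule_covered (specific_rule : List (String × String)) : List (String × String) → Bool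
  | [] => true
  | (key, value) :: rest =>
      if value ≠ "*" ∧ ((specific_rule.lookup key).getD "") ≠ value then false
      else is_rule_covered specific_rule rest

-- the inner 'for gen_rule in general_rules: … break' loop of A
def coveredLoop (rule : List (String × String)) : List (List (String × String)) → Bool
  | [] => false
  | g :: rest => if is_rule_covered rule g then true else coveredLoop rule rest

def apply_general_rules (rules : List (List (String × String))) (general_rules : List (List (String × String))) : List (List (String × String)) :=
  let covered_indices : PySem.Set Int :=
    (PySem.List.enumerate rules).foldl
      (fun s p => if coveredLoop p.2 general_rules then PySem.Set.add s p.1 else s)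
      PySem.Set.empty
  let remaining_rules : List (List (String × String)) :=
    (PySem.List.enumerate rules).foldl
      (fun acc p => if PySem.Set.contains covered_indices p.1 then acc else acc ++ [p.2])
      []
  remaining_rules ++ general_rules

-- ===== PORT B =====
-- B: outer loop over general_rules, each general rule filtering the survivor list once
def apply_general_rules_alt (rules : List (List (String × String))) (general_rules : List (List (String × String))) : List (List (String × String)) :=
  (general_rules.foldl
    (fun survivors g => survivors.filter (fun r => !(is_rule_covered r g)))
    rules) ++ general_rules

-- ===== PRECONDITION & SPEC =====
-- r is covered by g (the value is_rule_covered returns when it does not raise)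
def gr_covers (r g : List (String × String)) : Bool :=
  g.all (fun p => (p.2 == "*") || (r.lookup p.1 == some p.2))

-- the call is_rule_covered(r, g) does not raise: the first non-"*" entry of g that fails to
-- match r, if any, has its key present in r
def gr_raiseFree (r g : List (String × String)) : Bool :=
  (g.find? (fun p => (p.2 != "*") && !(r.lookup p.1 == some p.2))).all
    (fun p => (r.lookup p.1).isSome)

-- Pre_ holds exactly where A returns (it excludes exactly the inputs on which A raises KeyError;
-- B raises there too): both programs call is_rule_covered(r, general_rules[j]) only while no
-- earlier general rule covers r, and that call raises iff the first non-"*" entry of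
-- general_rules[j] failing to match r has its key missing from r.
def Pre_apply_general_rules (rules : List (List (String × String))) (general_rules : List (List (String × String))) : Prop :=
  ∀ r ∈ rules, ∀ j, (hj : j < general_rules.length) →
    (∀ i, (hi : i < j) → gr_covers r general_rules[i] = false) →
    gr_raiseFree r general_rules[j] = true
instance (rules : List (List (String × String))) (general_rules : List (List (String × String))) : Decidable (Pre_apply_general_rules rules general_rules) := by unfold Pre_apply_general_rules; infer_instance

def pvWitness_apply_general_rules : (List (List (String × String))) × (List (List (String × String))) :=
  ([[("a", "x")], [("a", "y")]], [[("a", "x")], [("b", "*")]])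

def Spec_apply_general_rules (rules : List (List (String × String))) (general_rules : List (List (String × String))) (out : List (List (String × String))) : Prop := out = apply_general_rules_alt rules general_rules
instance (rules : List (List (String × String))) (general_rules : List (List (String × String))) (out : List (List (String × String))) : Decidable (Spec_apply_general_rules rules general_rules out) := by unfold Spec_apply_general_rules; infer_instance

-- ===== CLAIM (what is proved, stated in full; the proofs are below) =====
def Claim_equal_apply_general_rules : Prop := ∀ (rules : List (List (String × String))) (general_rules : List (List (String × String))), Dom_apply_general_rules rules general_rules → Pre_apply_general_rules rules general_rules → Spec_apply_general_rules rules general_rules (apply_general_rules rules general_rules)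

-- ===== LEMMAS AND PROOFS =====

-- A's inner for/break loop computes any over the general rules
theorem coveredLoop_eq_any (rule : List (String × String)) (gs : List (List (String × String))) :
    coveredLoop rule gs = gs.any (fun g => is_rule_covered rule g) := by
  induction gs with
  | nil => rfl
  | cons g rest ih =>
      simp only [coveredLoop, List.any_cons, ih]
      by_cases h : is_rule_covered rule g = true <;> simp [h]

-- B's fold of per-general-rule filters is the filter by "not covered by any"
theorem foldl_filter_eq (gs : List (List (String × String)))
    (acc : List (List (String × String))) :
    gs.foldl (fun survivors g => survivors.filter (fun r => !(is_rule_covered r g))) acc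
      = acc.filter (fun r => !(gs.any (fun g => is_rule_covered r g))) := by
  induction gs generalizing acc with
  | nil => simp
  | cons g rest ih =>
      rw [List.foldl_cons, ih, List.filter_filter]
      apply List.filter_congr
      intro r _
      simp [Bool.and_comm]

-- membership in the set built by A's first pass
theorem mem_coveredFold (gs : List (List (String × String)))
    (rules : List (List (String × String))) (n : Int) (S : PySem.Set Int) (i : Int) :
    i ∈ (PySem.List.enumerate rules n).foldl
          (fun s p => if coveredLoop p.2 gs then PySem.Set.add s p.1 else s) S
      ↔ i ∈ S ∨ ∃ k : Nat, ∃ h : k < rules.length, coveredLoop rules[k] gs ∧ i = n + k := by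
  induction rules generalizing n S with
  | nil => simp [PySem.List.enumerate_nil]
  | cons r rest ih =>
      rw [PySem.List.enumerate_cons, List.foldl_cons, ih]
      constructor
      · rintro (hS | ⟨k, hk, hc, hi⟩)
        · by_cases hc : coveredLoop r gs = true
          · rw [if_pos hc, PySem.Set.mem_add] at hS
            rcases hS with hS | rfl
            · exact Or.inl hS
            · exact Or.inr ⟨0, by simp, by simpa using hc⟩
          · rw [if_neg hc] at hS
            exact Or.inl hS
        · exact Or.inr ⟨k + 1, by simpa using hk, by simpa using hc, by push_cast; omega⟩
      · rintro (hS | ⟨k, hk, hc, hi⟩)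
        · refine Or.inl ?_
          split
          · rw [PySem.Set.mem_add]; exact Or.inl hS
          · exact hS
        · match k, hk with
          | 0, _ =>
              refine Or.inl ?_
              simp only [List.getElem_cons_zero] at hc
              rw [if_pos hc, PySem.Set.mem_add]
              exact Or.inr (by push_cast at hi; omega)
          | k' + 1, hk =>
              refine Or.inr ⟨k', by simpa using hk, by simpa using hc, by push_cast at hi ⊢; omega⟩

-- A's second pass is a direct filter, given that S decides coverage on the indices it is asked about
theorem secondPass_eq_filter (gs : List (List (String × String)))
    (rules : List (List (String × String))) (n : Int) (S : PySem.Set Int)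
    (acc : List (List (String × String)))
    (hS : ∀ k : Nat, (h : k < rules.length) → ((n + k : Int) ∈ S ↔ coveredLoop rules[k] gs)) :
    (PySem.List.enumerate rules n).foldl
        (fun acc p => if PySem.Set.contains S p.1 then acc else acc ++ [p.2]) acc
      = acc ++ rules.filter (fun r => !(coveredLoop r gs)) := by
  induction rules generalizing n acc with
  | nil => simp [PySem.List.enumerate_nil]
  | cons r rest ih =>
      rw [PySem.List.enumerate_cons, List.foldl_cons]
      have h0 : (n : Int) ∈ S ↔ coveredLoop r gs := by
        have := hS 0 (by simp)
        simpa using this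
      have hrest : ∀ k : Nat, (h : k < rest.length) → ((n + 1 + k : Int) ∈ S ↔ coveredLoop rest[k] gs) := by
        intro k hk
        have := hS (k + 1) (by simpa using hk)
        simpa [add_assoc, add_comm, add_left_comm] using this
      rw [ih (n + 1) _ hrest]
      by_cases hm : (n : Int) ∈ S
      · have hc : coveredLoop r gs = true := h0.mp hm
        simp [hm, hc]
      · have hc : coveredLoop r gs = false := by
          rw [Bool.eq_false_iff]; exact fun h => hm (h0.mpr h)
        simp [hm, hc]

-- the two passes of A, written out (rfl: the let-bindings substituted)
theorem apply_general_rules_unfold (rules gs : List (List (String × String))) :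
    apply_general_rules rules gs =
      (PySem.List.enumerate rules).foldl
        (fun acc p => if PySem.Set.contains
            ((PySem.List.enumerate rules).foldl
              (fun s p => if coveredLoop p.2 gs then PySem.Set.add s p.1 else s)
              PySem.Set.empty) p.1 then acc else acc ++ [p.2]) [] ++ gs := rfl

-- ===== VERDICT (by name: the statement is the Claim_ definition above) =====
theorem apply_general_rules_spec : Claim_equal_apply_general_rules := by
  intro rules general_rules _ _
  unfold Spec_apply_general_rules apply_general_rules_alt
  rw [apply_general_rules_unfold, foldl_filter_eq]
  have hmem : ∀ k : Nat, (h : k < rules.length) →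
      (((0 : Int) + k : Int) ∈ (PySem.List.enumerate rules 0).foldl
          (fun s p => if coveredLoop p.2 general_rules then PySem.Set.add s p.1 else s)
          PySem.Set.empty ↔ coveredLoop rules[k] general_rules) := by
    intro k hk
    rw [mem_coveredFold]
    constructor
    · rintro (h | ⟨k', hk', hc, hi⟩)
      · simp [PySem.Set.empty] at h
      · have : k' = k := by omega
        subst this; exact hc
    · intro hc; exact Or.inr ⟨k, hk, hc, rfl⟩
  rw [secondPass_eq_filter general_rules rules 0 _ [] hmem]
  simp only [List.nil_append]
  congr 1
  apply List.filter_congr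
  intro r _
  rw [coveredLoop_eq_any]
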